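-- pv_equiv track=rewrite | github.com/PaulOfili/patrick-s_code | subset_sum.py | check_divisors
-- ===== SOURCE A (Python) =====
-- def check_divisors(num):
--     divisors_arr = []
--     sum_of_divisors = 0
--     for i in range(1, num):
--         if num % i == 0:
--             sum_of_divisors += i
--             divisors_arr.append(i)
--
--     return sum_of_divisors > num, divisors_arr
-- ===== SOURCE B (Python) =====
-- def check_divisors(num):
--     small, large = [], []
--     if num > 1:
--         i = 1
--         while i * i <= num:
--             if num % i == 0:
--                 small.append(i)
--                 j = num // i
--                 if j != i and j != num:
--                     large.append(j)
--             i += 1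
--     divisors = small + large[::-1]
--     return sum(divisors) > num, divisors
-- ===== Notes on version B (the rewrite author's own statement) =====
-- stated objective: faster
-- what changed: B replaces A's linear scan of every candidate 1..num-1 by trial division up to sqrt(num), collecting each divisor pair (i, num//i) and concatenating the small divisors with the reversed cofactors to reproduce the ascending order.
import Mathlib
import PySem

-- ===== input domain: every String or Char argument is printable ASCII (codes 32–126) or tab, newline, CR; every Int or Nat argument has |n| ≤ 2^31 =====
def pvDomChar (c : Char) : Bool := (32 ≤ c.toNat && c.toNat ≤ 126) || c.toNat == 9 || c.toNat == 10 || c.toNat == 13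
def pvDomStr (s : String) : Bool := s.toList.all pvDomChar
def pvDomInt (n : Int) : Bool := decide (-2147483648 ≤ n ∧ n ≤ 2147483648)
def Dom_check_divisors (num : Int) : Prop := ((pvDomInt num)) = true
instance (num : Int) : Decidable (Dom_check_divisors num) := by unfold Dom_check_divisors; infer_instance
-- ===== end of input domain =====

-- B replaces A's O(num) scan of all candidates below num by trial division up to sqrt(num),
-- collecting each divisor pair (i, num//i) and concatenating small ++ reversed(large): asymptotically faster.

-- ===== PORT A =====
-- literal port of A: one pass i = 1 .. num-1, accumulating (sum_of_divisors, divisors_arr)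
def check_divisors (num : Int) : Bool × List Int :=
  let st := (PySem.List.pyRange 1 num 1).foldl
    (fun (st : Int × List Int) i =>
      if PySem.Int.mod num i == 0 then (st.1 + i, st.2 ++ [i]) else st)
    (0, [])
  (decide (st.1 > num), st.2)

-- ===== PORT B =====
-- the while loop of Source B: i advances while i*i ≤ num, appending i to `small` and num//i to `large`.
-- (the `1 ≤ i` conjunct only makes the recursion total for arbitrary starting i; the loop starts at i = 1)
def pvLoopB (num i : Int) (small large : List Int) : List Int × List Int :=
  if h : 1 ≤ i ∧ i * i ≤ num then
    if PySem.Int.mod num i == 0 then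
      pvLoopB num (i + 1) (small ++ [i])
        (if PySem.Int.floordiv num i ≠ i ∧ PySem.Int.floordiv num i ≠ num then
          large ++ [PySem.Int.floordiv num i] else large)
    else
      pvLoopB num (i + 1) small large
  else (small, large)
termination_by (num + 1 - i).toNat
decreasing_by
  all_goals
    have hii : i ≤ i * i := le_mul_of_one_le_left (by omega) h.1
    omega

def check_divisors_alt (num : Int) : Bool × List Int :=
  let p := if num > 1 then pvLoopB num 1 [] [] else ([], [])
  let divisors := p.1 ++ p.2.reverse
  (decide (divisors.sum > num), divisors)

-- ===== PRECONDITION & SPEC =====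
def Spec_check_divisors (num : Int) (out : Bool × List Int) : Prop := out = check_divisors_alt num
instance (num : Int) (out : Bool × List Int) : Decidable (Spec_check_divisors num out) := by unfold Spec_check_divisors; infer_instance

-- ===== CLAIM (what is proved, stated in full; the proofs are below) =====
def Claim_equal_check_divisors : Prop := ∀ (num : Int), Dom_check_divisors num → Spec_check_divisors num (check_divisors num)

-- ===== LEMMAS AND PROOFS =====

-- the divisor predicate both programs test
def pvP (num k : Int) : Bool := PySem.Int.mod num k == 0
-- the extra condition B's loop tests before appending to `large`
def pvQ (num k : Int) : Bool :=
  pvP num k && decide (PySem.Int.floordiv num k ≠ k ∧ PySem.Int.floordiv num k ≠ num)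
-- integer segment [i, r]
def pvSeg (i r : Int) : List Int := (List.range (r + 1 - i).toNat).map (fun t : Nat => i + (t : Int))
-- integer sqrt of num
def pvR (num : Int) : Int := (Nat.sqrt num.toNat : Int)

lemma pvSeg_eq_nil {i r : Int} (h : r < i) : pvSeg i r = [] := by
  simp [pvSeg, (by omega : (r + 1 - i).toNat = 0)]

lemma pvSeg_cons {i r : Int} (h : i ≤ r) : pvSeg i r = i :: pvSeg (i + 1) r := by
  unfold pvSeg
  rw [show (r + 1 - i).toNat = (r + 1 - (i + 1)).toNat + 1 by omega, List.range_succ_eq_map,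
    List.map_cons, List.map_map]
  refine congrArg₂ _ (by simp) (List.map_congr_left ?_)
  intro t ht
  simp only [Function.comp, Nat.succ_eq_add_one]
  push_cast
  ring

lemma mem_pvSeg {i r x : Int} : x ∈ pvSeg i r ↔ i ≤ x ∧ x ≤ r := by
  simp only [pvSeg, List.mem_map, List.mem_range]
  constructor
  · rintro ⟨t, ht, rfl⟩; omega
  · rintro ⟨h1, h2⟩; exact ⟨(x - i).toNat, by omega, by omega⟩

lemma pairwise_pvSeg (i r : Int) : (pvSeg i r).Pairwise (· < ·) := by
  simp only [pvSeg, List.pairwise_map]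
  exact List.pairwise_lt_range.imp (fun {a b} h => by omega)

-- guard characterization: for k ≥ 1 and num ≥ 1, k*k ≤ num ↔ k ≤ pvR num
lemma pvGuard_iff {num k : Int} (hn : 1 ≤ num) (hk : 1 ≤ k) :
    k * k ≤ num ↔ k ≤ pvR num := by
  have e1 : ((k.toNat : Int)) = k := Int.toNat_of_nonneg (by omega)
  have e2 : ((num.toNat : Int)) = num := Int.toNat_of_nonneg (by omega)
  rw [pvR]
  constructor
  · intro h
    have hc : ((k.toNat * k.toNat : Nat) : Int) ≤ ((num.toNat : Nat) : Int) := by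
      push_cast [e1, e2]; exact h
    have := Nat.le_sqrt.mpr (by exact_mod_cast hc)
    omega
  · intro h
    have hnat : k.toNat ≤ Nat.sqrt num.toNat := by omega
    have hc : ((k.toNat * k.toNat : Nat) : Int) ≤ ((num.toNat : Nat) : Int) :=
      by exact_mod_cast Nat.le_sqrt.mp hnat
    push_cast [e1, e2] at hc
    exact hc

-- A's fold characterized as a filter
lemma pvFoldA (num : Int) : ∀ (l : List Int) (s : Int) (acc : List Int),
    l.foldl (fun (st : Int × List Int) i =>
      if PySem.Int.mod num i == 0 then (st.1 + i, st.2 ++ [i]) else st) (s, acc)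
    = (s + (l.filter (pvP num)).sum, acc ++ l.filter (pvP num)) := by
  intro l
  induction l with
  | nil => intro s acc; simp
  | cons x xs ih =>
    intro s acc
    rw [List.foldl_cons, List.filter_cons]
    by_cases hx : (PySem.Int.mod num x == 0) = true
    · rw [if_pos hx, ih]
      have hx' : pvP num x = true := hx
      rw [hx']
      simp only [if_true, List.sum_cons, Prod.mk.injEq, List.append_assoc, List.cons_append,
        List.nil_append]
      exact ⟨by ring, by trivial⟩
    · rw [if_neg hx, ih]
      have hx' : pvP num x = false := eq_false_of_ne_true hx
      rw [hx']
      simp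

-- B's loop characterized: it collects the divisors in [i, r] and their cofactors
lemma pvLoopB_char (num : Int) (hn : 1 ≤ num) :
    ∀ (fuel : Nat) (i : Int) (small large : List Int), 1 ≤ i → fuel = (pvR num + 1 - i).toNat →
    pvLoopB num i small large =
      (small ++ (pvSeg i (pvR num)).filter (pvP num),
       large ++ ((pvSeg i (pvR num)).filter (pvQ num)).map (fun k => PySem.Int.floordiv num k)) := by
  intro fuel
  induction fuel with
  | zero =>
    intro i small large hi hf
    have hir : pvR num < i := by omega
    have hng : ¬ (1 ≤ i ∧ i * i ≤ num) := by
      rintro ⟨h1, h2⟩; exact absurd ((pvGuard_iff hn h1).mp h2) (by omega)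
    rw [pvLoopB, dif_neg hng]
    simp [pvSeg_eq_nil hir]
  | succ n ih =>
    intro i small large hi hf
    by_cases hir : i ≤ pvR num
    · have hguard : 1 ≤ i ∧ i * i ≤ num := ⟨hi, (pvGuard_iff hn hi).mpr hir⟩
      rw [pvLoopB, dif_pos hguard, pvSeg_cons hir]
      by_cases hp : (PySem.Int.mod num i == 0) = true
      · rw [if_pos hp]
        by_cases hq : PySem.Int.floordiv num i ≠ i ∧ PySem.Int.floordiv num i ≠ num
        · rw [if_pos hq, ih (i + 1) _ _ (by omega) (by omega)]
          have hq' : pvQ num i = true := by simp [pvQ, pvP, hp, hq.1, hq.2]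
          have hp' : pvP num i = true := hp
          simp [hp', hq']
        · rw [if_neg hq, ih (i + 1) _ _ (by omega) (by omega)]
          have hq' : pvQ num i = false := by
            simp only [pvQ, pvP, hp, Bool.true_and, decide_eq_false_iff_not]
            exact hq
          have hp' : pvP num i = true := hp
          simp [hp', hq']
      · rw [if_neg hp, ih (i + 1) _ _ (by omega) (by omega)]
        have hp' : pvP num i = false := eq_false_of_ne_true hp
        have hq' : pvQ num i = false := by simp [pvQ, hp']
        simp [hp', hq']
    · have hng : ¬ (1 ≤ i ∧ i * i ≤ num) := by
        rintro ⟨h1, h2⟩; exact absurd ((pvGuard_iff hn h1).mp h2) (by omega)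
      rw [pvLoopB, dif_neg hng]
      simp [pvSeg_eq_nil (by omega : pvR num < i)]

-- arithmetic helpers about exact division
lemma pvP_iff {num k : Int} : pvP num k = true ↔ k ∣ num := by
  simp [pvP, PySem.Int.mod_eq_zero_iff_dvd]

lemma pvFd_mul {num k : Int} (hk : 1 ≤ k) (hd : k ∣ num) :
    PySem.Int.floordiv num k * k = num := by
  rw [PySem.Int.floordiv_eq_ediv_of_pos (by omega)]
  exact Int.ediv_mul_cancel hd

-- the merge step: small divisors ++ reversed cofactors = all proper divisors in ascending order
lemma pvMerge (num : Int) (hn : 2 ≤ num) :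
    (pvSeg 1 (pvR num)).filter (pvP num)
      ++ (((pvSeg 1 (pvR num)).filter (pvQ num)).map (fun k => PySem.Int.floordiv num k)).reverse
    = (PySem.List.pyRange 1 num 1).filter (pvP num) := by
  have hrn : pvR num < num := by
    have h1 : Nat.sqrt num.toNat < num.toNat := Nat.sqrt_lt_self (by omega)
    simp only [pvR]; omega
  -- membership facts about the Lo part
  have memLo : ∀ x : Int, x ∈ (pvSeg 1 (pvR num)).filter (pvP num) ↔
      1 ≤ x ∧ x ≤ pvR num ∧ pvP num x = true := by
    intro x; rw [List.mem_filter, mem_pvSeg]; tauto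
  -- membership facts about the Hi part
  have memHi : ∀ x : Int,
      x ∈ ((pvSeg 1 (pvR num)).filter (pvQ num)).map (fun k => PySem.Int.floordiv num k) ↔
      ∃ k, (1 ≤ k ∧ k ≤ pvR num ∧ pvQ num k = true) ∧ PySem.Int.floordiv num k = x := by
    intro x
    rw [List.mem_map]
    constructor
    · rintro ⟨k, hk, rfl⟩
      rw [List.mem_filter, mem_pvSeg] at hk
      exact ⟨k, ⟨hk.1.1, hk.1.2, hk.2⟩, rfl⟩
    · rintro ⟨k, ⟨h1, h2, h3⟩, rfl⟩
      exact ⟨k, by rw [List.mem_filter, mem_pvSeg]; exact ⟨⟨h1, h2⟩, h3⟩, rfl⟩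
  -- what pvQ gives arithmetically
  have hQ : ∀ k : Int, 1 ≤ k → k ≤ pvR num → pvQ num k = true →
      k ∣ num ∧ PySem.Int.floordiv num k * k = num ∧
      PySem.Int.floordiv num k ≠ k ∧ PySem.Int.floordiv num k ≠ num := by
    intro k h1 h2 h3
    simp only [pvQ, Bool.and_eq_true, decide_eq_true_eq] at h3
    have hd : k ∣ num := pvP_iff.mp h3.1
    exact ⟨hd, pvFd_mul h1 hd, h3.2.1, h3.2.2⟩
  -- a cofactor is strictly above the square root
  have hHiBig : ∀ k : Int, 1 ≤ k → k ≤ pvR num → pvQ num k = true →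
      1 ≤ PySem.Int.floordiv num k ∧ num < PySem.Int.floordiv num k * PySem.Int.floordiv num k ∧
      PySem.Int.floordiv num k < num := by
    intro k h1 h2 h3
    obtain ⟨hd, hmul, hne, hnn⟩ := hQ k h1 h2 h3
    set y := PySem.Int.floordiv num k with hy
    have hkk : k * k ≤ num := (pvGuard_iff (by omega) h1).mpr h2
    have hypos : 1 ≤ y := by nlinarith
    have hky : k < y := by
      rcases lt_or_ge k y with h | h
      · exact h
      · exfalso
        have : y = k := by nlinarith
        exact hne this
    refine ⟨hypos, by nlinarith, ?_⟩
    have : y ≤ num := by nlinarith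
    omega
  -- combined membership
  have memIff : ∀ x : Int,
      (x ∈ (pvSeg 1 (pvR num)).filter (pvP num) ∨
       x ∈ ((pvSeg 1 (pvR num)).filter (pvQ num)).map (fun k => PySem.Int.floordiv num k)) ↔
      (1 ≤ x ∧ x < num ∧ pvP num x = true) := by
    intro x
    constructor
    · rintro (hx | hx)
      · rw [memLo] at hx
        exact ⟨hx.1, by omega, hx.2.2⟩
      · rw [memHi] at hx
        obtain ⟨k, ⟨h1, h2, h3⟩, rfl⟩ := hx
        obtain ⟨hd, hmul, hne, hnn⟩ := hQ k h1 h2 h3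
        obtain ⟨hpos, _, hlt⟩ := hHiBig k h1 h2 h3
        refine ⟨hpos, hlt, pvP_iff.mpr ⟨k, hmul.symm⟩⟩
    · rintro ⟨h1, h2, h3⟩
      have hd : x ∣ num := pvP_iff.mp h3
      rcases le_or_gt x (pvR num) with hx | hx
      · exact Or.inl ((memLo x).mpr ⟨h1, hx, h3⟩)
      · right
        have hxx : num < x * x := by
          rcases lt_or_ge num (x * x) with h' | h'
          · exact h'
          · exact absurd ((pvGuard_iff (num := num) (k := x) (by omega) h1).mp h') (by omega)
        set k := PySem.Int.floordiv num x with hk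
        have hmul : k * x = num := pvFd_mul h1 hd
        have hkpos : 1 ≤ k := by nlinarith
        have hkx : k < x := by nlinarith
        have hkk : k * k ≤ num := by nlinarith
        have hkr : k ≤ pvR num := (pvGuard_iff (by omega) hkpos).mp hkk
        have hkd : k ∣ num := ⟨x, hmul.symm ▸ rfl⟩
        have hfdk : PySem.Int.floordiv num k * k = num := pvFd_mul hkpos hkd
        have hfdkx : PySem.Int.floordiv num k = x := by
          have : PySem.Int.floordiv num k * k = x * k := by rw [hfdk, ← hmul]; ring
          exact mul_right_cancel₀ (by omega) this
        rw [memHi]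
        refine ⟨k, ⟨hkpos, hkr, ?_⟩, hfdkx⟩
        simp only [pvQ, Bool.and_eq_true, decide_eq_true_eq]
        exact ⟨pvP_iff.mpr hkd, by rw [hfdkx]; omega, by rw [hfdkx]; omega⟩
  -- sortedness of the left-hand side
  have pwLo : ((pvSeg 1 (pvR num)).filter (pvP num)).Pairwise (· < ·) :=
    (pairwise_pvSeg 1 (pvR num)).filter _
  have pwHiRev : ((((pvSeg 1 (pvR num)).filter (pvQ num)).map
      (fun k => PySem.Int.floordiv num k)).reverse).Pairwise (· < ·) := by
    rw [List.pairwise_reverse, List.pairwise_map]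
    refine List.Pairwise.imp_of_mem ?_ ((pairwise_pvSeg 1 (pvR num)).filter _)
    intro a b ha hb hab
    rw [List.mem_filter, mem_pvSeg] at ha hb
    obtain ⟨hda, hma, _, _⟩ := hQ a ha.1.1 ha.1.2 ha.2
    obtain ⟨hdb, hmb, _, _⟩ := hQ b hb.1.1 hb.1.2 hb.2
    set A := PySem.Int.floordiv num a
    set B := PySem.Int.floordiv num b
    have hApos : 1 ≤ A := by nlinarith [ha.1.1]
    have hBpos : 1 ≤ B := by nlinarith [hb.1.1]
    by_contra hc
    push Not at hc
    nlinarith [ha.1.1, hb.1.1]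
  have pwLHS : ((pvSeg 1 (pvR num)).filter (pvP num)
      ++ (((pvSeg 1 (pvR num)).filter (pvQ num)).map
        (fun k => PySem.Int.floordiv num k)).reverse).Pairwise (· < ·) := by
    rw [List.pairwise_append]
    refine ⟨pwLo, pwHiRev, ?_⟩
    intro x hx y hy
    rw [memLo] at hx
    rw [List.mem_reverse, memHi] at hy
    obtain ⟨k, ⟨h1, h2, h3⟩, rfl⟩ := hy
    obtain ⟨_, hyy, _⟩ := hHiBig k h1 h2 h3
    have hxx : x * x ≤ num := (pvGuard_iff (by omega) hx.1).mpr hx.2.1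
    by_contra hc
    push Not at hc
    nlinarith [hHiBig k h1 h2 h3, hx.1]
  -- sortedness of the right-hand side
  have pwRHS : ((PySem.List.pyRange 1 num 1).filter (pvP num)).Pairwise (· < ·) :=
    (PySem.List.pairwise_lt_pyRange_one 1 num).filter _
  -- both sides are the same finite set of integers, sorted strictly: they are equal
  have ndL := pwLHS.nodup
  have ndR := pwRHS.nodup
  have hperm : ((pvSeg 1 (pvR num)).filter (pvP num)
      ++ (((pvSeg 1 (pvR num)).filter (pvQ num)).map
        (fun k => PySem.Int.floordiv num k)).reverse).Perm
      ((PySem.List.pyRange 1 num 1).filter (pvP num)) := by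
    rw [List.perm_ext_iff_of_nodup ndL ndR]
    intro x
    rw [List.mem_append, List.mem_reverse, memIff x, List.mem_filter,
      PySem.List.mem_pyRange_one]
    tauto
  exact hperm.eq_of_pairwise (fun a b _ _ h1 h2 => absurd h2 (lt_asymm h1)) pwLHS pwRHS

-- ===== VERDICT (by name: the statement is the Claim_ definition above) =====
theorem check_divisors_spec : Claim_equal_check_divisors := by
  intro num _
  unfold Spec_check_divisors check_divisors check_divisors_alt
  by_cases h : num > 1
  · have e := pvMerge num (by omega)
    rw [if_pos h, pvLoopB_char num (by omega) ((pvR num + 1 - 1).toNat) 1 [] [] le_rfl rfl,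
      pvFoldA num _ 0 []]
    simp only [List.nil_append, zero_add]
    exact (congrArg (fun l : List Int => (decide (l.sum > num), l)) e).symm
  · rw [if_neg h, PySem.List.pyRange_one_eq_nil (by omega)]
    simp
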